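-- pv_equiv track=rewrite | github.com/fritzo/pomagma | src/torch/extension_test.py | make_dense_bin_fun
-- ===== SOURCE A (Python) =====
-- def make_dense_bin_fun(N: int) -> list[tuple[int, int, int]]:
--     table: list[tuple[int, int, int]] = []
--     for i in range(N):
--         for j in range(N):
--             k = i * j
--             if k < N:
--                 table.append((i, j, k))
--     return table
-- ===== SOURCE B (Python) =====
-- def make_dense_bin_fun(N: int) -> list[tuple[int, int, int]]:
--     table: list[tuple[int, int, int]] = []
--     for j in range(N):
--         table.append((0, j, 0))
--     for i in range(1, N):
--         for j in range((N - 1) // i + 1):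
--             table.append((i, j, i * j))
--     return table
-- ===== Notes on version B (the rewrite author's own statement) =====
-- stated objective: faster
-- what changed: Instead of scanning all N values of j for every i and filtering by i*j < N, B handles the i=0 row directly and for each i >= 1 iterates j only up to (N-1)//i, so no filtering scan over the full range is needed.
import Mathlib
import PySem

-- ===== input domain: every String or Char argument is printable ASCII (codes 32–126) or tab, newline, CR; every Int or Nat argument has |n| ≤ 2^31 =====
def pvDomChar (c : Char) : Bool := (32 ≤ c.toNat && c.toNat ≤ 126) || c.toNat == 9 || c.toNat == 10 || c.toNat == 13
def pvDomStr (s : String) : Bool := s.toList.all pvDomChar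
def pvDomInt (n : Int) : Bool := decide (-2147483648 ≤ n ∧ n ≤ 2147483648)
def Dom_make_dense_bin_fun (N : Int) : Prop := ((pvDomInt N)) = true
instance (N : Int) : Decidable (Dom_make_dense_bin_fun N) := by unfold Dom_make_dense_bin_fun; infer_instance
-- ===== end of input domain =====

-- B handles the i = 0 row directly and bounds the inner loop by (N-1)//i for i ≥ 1
-- instead of scanning all N values of j and filtering; same table, fewer iterations.

-- ===== PORT A =====
def make_dense_bin_fun (N : Int) : List (Int × Int × Int) :=
  (PySem.List.pyRange 0 N 1).foldl (fun table i =>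
    (PySem.List.pyRange 0 N 1).foldl (fun table j =>
      let k := i * j
      if k < N then table ++ [(i, j, k)] else table) table) []

-- ===== PORT B =====
def make_dense_bin_fun_alt (N : Int) : List (Int × Int × Int) :=
  let t0 := (PySem.List.pyRange 0 N 1).foldl (fun table j => table ++ [((0 : Int), j, (0 : Int))]) []
  (PySem.List.pyRange 1 N 1).foldl (fun table i =>
    (PySem.List.pyRange 0 (PySem.Int.floordiv (N - 1) i + 1) 1).foldl
      (fun table j => table ++ [(i, j, i * j)]) table) t0

-- ===== PRECONDITION & SPEC =====
def Spec_make_dense_bin_fun (N : Int) (out : List (Int × Int × Int)) : Prop := out = make_dense_bin_fun_alt N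
instance (N : Int) (out : List (Int × Int × Int)) : Decidable (Spec_make_dense_bin_fun N out) := by unfold Spec_make_dense_bin_fun; infer_instance

-- ===== CLAIM (what is proved, stated in full; the proofs are below) =====
def Claim_equal_make_dense_bin_fun : Prop := ∀ (N : Int), Dom_make_dense_bin_fun N → Spec_make_dense_bin_fun N (make_dense_bin_fun N)

-- ===== LEMMAS AND PROOFS =====

theorem pv_flatMap_congr {α β : Type} {l : List α} {f g : α → List β}
    (h : ∀ x ∈ l, f x = g x) : l.flatMap f = l.flatMap g := by
  induction l with
  | nil => rfl
  | cons a t ih =>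
    simp only [List.flatMap_cons]
    rw [h a (List.mem_cons_self), ih (fun x hx => h x (List.mem_cons_of_mem a hx))]

-- closed form of port A
theorem pvA_eq (N : Int) :
    make_dense_bin_fun N =
      (PySem.List.pyRange 0 N 1).flatMap (fun i =>
        ((PySem.List.pyRange 0 N 1).filter (fun j => decide (i * j < N))).map
          (fun j => (i, j, i * j))) := by
  unfold make_dense_bin_fun
  simp only [PySem.List.foldl_append_ite, PySem.List.foldl_append_eq_flatMap,
    List.nil_append]

-- closed form of port B
theorem pvB_eq (N : Int) :
    make_dense_bin_fun_alt N =
      (PySem.List.pyRange 0 N 1).map (fun j => ((0 : Int), j, (0 : Int))) ++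
      (PySem.List.pyRange 1 N 1).flatMap (fun i =>
        (PySem.List.pyRange 0 (PySem.Int.floordiv (N - 1) i + 1) 1).map
          (fun j => (i, j, i * j))) := by
  unfold make_dense_bin_fun_alt
  simp only [PySem.List.foldl_append_singleton_eq_map, PySem.List.foldl_append_eq_flatMap,
    List.nil_append]

-- the filtered full scan for a fixed i ≥ 1 is exactly the bounded range
theorem pv_filter_eq (N i : Int) (h1 : 1 ≤ i) (h2 : i < N) :
    (PySem.List.pyRange 0 N 1).filter (fun j => decide (i * j < N)) =
      PySem.List.pyRange 0 (PySem.Int.floordiv (N - 1) i + 1) 1 := by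
  have hi : (0 : Int) < i := by omega
  have hN : (0 : Int) < N := by omega
  set q := PySem.Int.floordiv (N - 1) i with hq
  have hjq : ∀ j : Int, (j ≤ q ↔ j * i ≤ N - 1) := fun j =>
    PySem.Int.le_floordiv_iff_mul_le hi
  have hq0 : 0 ≤ q := by
    have := (hjq 0).2 (by nlinarith)
    omega
  have hqN : q + 1 ≤ N := by
    by_contra h
    have : N ≤ q := by omega
    have := (hjq N).1 this
    nlinarith
  rw [PySem.List.pyRange_one_append 0 (q + 1) N (by omega) hqN, List.filter_append]
  have hfirst : (PySem.List.pyRange 0 (q + 1) 1).filter (fun j => decide (i * j < N)) =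
      PySem.List.pyRange 0 (q + 1) 1 := by
    apply List.filter_eq_self.2
    intro j hj
    rw [PySem.List.mem_pyRange_one] at hj
    have : j * i ≤ N - 1 := (hjq j).1 (by omega)
    simp only [decide_eq_true_eq]
    nlinarith
  have hsecond : (PySem.List.pyRange (q + 1) N 1).filter (fun j => decide (i * j < N)) = [] := by
    apply List.filter_eq_nil_iff.2
    intro j hj
    rw [PySem.List.mem_pyRange_one] at hj
    simp only [decide_eq_true_eq, not_lt]
    by_contra h
    push Not at h
    have : j ≤ q := (hjq j).2 (by nlinarith)
    omega
  rw [hfirst, hsecond, List.append_nil]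

-- ===== VERDICT (by name: the statement is the Claim_ definition above) =====
theorem make_dense_bin_fun_spec : Claim_equal_make_dense_bin_fun := by
  intro N _
  show make_dense_bin_fun N = make_dense_bin_fun_alt N
  rw [pvA_eq, pvB_eq]
  by_cases hN : N ≤ 0
  · rw [PySem.List.pyRange_one_eq_nil (by omega), PySem.List.pyRange_one_eq_nil (by omega)]
    simp
  · push Not at hN
    rw [PySem.List.pyRange_one_cons (show (0 : Int) < N by omega), List.flatMap_cons]
    congr 1
    · -- i = 0 row: every j passes the filter
      have hall : ∀ l : List Int,
          l.filter (fun j => decide ((0 : Int) * j < N)) = l := fun l =>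
        List.filter_eq_self.2 (fun j _ => by
          simp only [zero_mul, decide_eq_true_eq]; omega)
      rw [hall]
      simp
    · rw [show (0 : Int) :: PySem.List.pyRange (0 + 1) N 1 = PySem.List.pyRange 0 N 1 from
        (PySem.List.pyRange_one_cons (show (0 : Int) < N by omega)).symm]
      exact pv_flatMap_congr (fun i hi => by
        rw [PySem.List.mem_pyRange_one] at hi
        rw [pv_filter_eq N i (by omega) hi.2])
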